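-- pv_equiv track=rewrite | github.com/PhillHenry/maths_playground | src/main/python/phill/text/TermCategoryVectorizer.py | term_to_cat_dict
-- ===== SOURCE A (Python) =====
-- import collections
--
-- def term_to_cat_dict(doc_to_cat):
--     """
--     :param doc_to_cat: (text, cat id) tuples
--     :return: map of term to category histograms
--     """
--     t_to_cs = collections.defaultdict(lambda: collections.defaultdict(lambda: 0))
--     for d, c in doc_to_cat:
--         for w in d.split(" "):
--             histo = t_to_cs[w]
--             x = histo[c]
--             y = x + 1
--             histo[c] = y
--     return t_to_cs
-- ===== SOURCE B (Python) =====
-- import collections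
--
--
-- def term_to_cat_dict(doc_to_cat):
--     """Group-by decomposition: flatten to (word, cat) pairs, then build each
--     word's category histogram with one Counter per distinct word."""
--     pairs = [(w, c) for text, c in doc_to_cat for w in text.split(" ")]
--     result = collections.defaultdict(lambda: collections.defaultdict(lambda: 0))
--     for w in dict.fromkeys(w for w, _ in pairs):
--         histo = result[w]
--         for c, n in collections.Counter(c for x, c in pairs if x == w).items():
--             histo[c] = n
--     return result
-- ===== Notes on version B (the rewrite author's own statement) =====
-- stated objective: alternative
-- what changed: Replaces A's single-pass incremental nested-defaultdict counting with a group-by decomposition: flatten documents to (word, cat) pairs once, iterate the distinct words in first-occurrence order, and build each word's histogram wholesale with a Counter over that word's categories, then install the finished histograms.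
import Mathlib
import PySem

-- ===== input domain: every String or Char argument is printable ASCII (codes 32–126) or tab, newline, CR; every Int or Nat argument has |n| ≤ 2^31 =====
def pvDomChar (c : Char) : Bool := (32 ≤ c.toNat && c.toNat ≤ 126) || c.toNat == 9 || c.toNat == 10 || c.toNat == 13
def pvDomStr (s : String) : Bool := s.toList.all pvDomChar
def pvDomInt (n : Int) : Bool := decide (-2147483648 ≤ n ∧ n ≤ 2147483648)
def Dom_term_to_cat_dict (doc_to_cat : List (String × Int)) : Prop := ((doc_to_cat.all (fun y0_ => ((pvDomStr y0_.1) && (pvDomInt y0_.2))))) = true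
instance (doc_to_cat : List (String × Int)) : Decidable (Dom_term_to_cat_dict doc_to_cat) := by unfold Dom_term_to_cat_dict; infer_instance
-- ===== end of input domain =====

-- B rebuilds the same term→category histograms by a group-by decomposition (flatten to pairs,
-- one Counter per distinct word) instead of A's incremental nested counting; objective: alternative.

-- ===== PORT A =====
-- exact port of str.split(" ") (nonempty separator), shared by both ports
def pvSplit (s : String) : List String :=
  (PySem.Chars.splitOn s.toList [' ']).map (fun w => String.ofList w)

def term_to_cat_dict (doc_to_cat : List (String × Int)) : List (String × List (Int × Int)) :=
  let t_to_cs : PySem.Dict String (PySem.Dict Int Int) :=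
    doc_to_cat.foldl (fun st dc =>
      (pvSplit dc.1).foldl (fun st w =>
        st.modify w PySem.Dict.empty (fun histo => histo.modify dc.2 0 (· + 1))) st)
      PySem.Dict.empty
  t_to_cs.items.map (fun p => (p.1, p.2.items))

-- ===== PORT B =====
def term_to_cat_dict_alt (doc_to_cat : List (String × Int)) : List (String × List (Int × Int)) :=
  let pairs : List (String × Int) :=
    doc_to_cat.flatMap (fun dc => (pvSplit dc.1).map (fun w => (w, dc.2)))
  let words : List String := PySem.List.dedup (pairs.map (fun p => p.1))
  let result : PySem.Dict String (PySem.Dict Int Int) :=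
    words.foldl (fun res w =>
      res.modify w PySem.Dict.empty (fun histo =>
        (PySem.Dict.counter ((pairs.filter (fun p => p.1 == w)).map (fun p => p.2))).items.foldl
          (fun h cn => h.insert cn.1 cn.2) histo))
      PySem.Dict.empty
  result.items.map (fun p => (p.1, p.2.items))

-- ===== PRECONDITION & SPEC =====
def Spec_term_to_cat_dict (doc_to_cat : List (String × Int)) (out : List (String × List (Int × Int))) : Prop := out = term_to_cat_dict_alt doc_to_cat
instance (doc_to_cat : List (String × Int)) (out : List (String × List (Int × Int))) : Decidable (Spec_term_to_cat_dict doc_to_cat out) := by unfold Spec_term_to_cat_dict; infer_instance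

-- ===== CLAIM (what is proved, stated in full; the proofs are below) =====
def Claim_equal_term_to_cat_dict : Prop := ∀ (doc_to_cat : List (String × Int)), Dom_term_to_cat_dict doc_to_cat → Spec_term_to_cat_dict doc_to_cat (term_to_cat_dict doc_to_cat)

-- ===== LEMMAS AND PROOFS =====

-- A's elementary step on the nested dict, per (word, cat) pair
def pvStepA (st : PySem.Dict String (PySem.Dict Int Int)) (p : String × Int) :
    PySem.Dict String (PySem.Dict Int Int) :=
  st.modify p.1 PySem.Dict.empty (fun histo => histo.modify p.2 0 (· + 1))

-- A's nested loop is the single fold of pvStepA over the flattened pair list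
theorem pvA_flatten (doc : List (String × Int)) (st : PySem.Dict String (PySem.Dict Int Int)) :
    doc.foldl (fun st dc =>
      (pvSplit dc.1).foldl (fun st w =>
        st.modify w PySem.Dict.empty (fun histo => histo.modify dc.2 0 (· + 1))) st) st
    = (doc.flatMap (fun dc => (pvSplit dc.1).map (fun w => (w, dc.2)))).foldl
        pvStepA st := by
  induction doc generalizing st with
  | nil => rfl
  | cons dc rest ih =>
      simp only [List.foldl_cons, List.flatMap_cons, List.foldl_append, List.foldl_map, ih]
      rfl

-- closed form of the per-word histogram after folding pvStepA
theorem pvA_getD (ps : List (String × Int)) (st : PySem.Dict String (PySem.Dict Int Int))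
    (w : String) :
    (ps.foldl pvStepA st).getD w PySem.Dict.empty
    = ((ps.filter (fun p => p.1 == w)).map (fun p => p.2)).foldl
        (fun h c => h.modify c 0 (· + 1)) (st.getD w PySem.Dict.empty) := by
  induction ps generalizing st with
  | nil => rfl
  | cons p rest ih =>
      simp only [List.foldl_cons, List.filter_cons, ih]
      by_cases hw : p.1 = w
      · simp [pvStepA, hw, PySem.Dict.getD_modify_self]
      · have hb : (p.1 == w) = false := by simp [hw]
        simp only [pvStepA, hb, Bool.false_eq_true, if_false]
        rw [PySem.Dict.getD_modify_of_ne st PySem.Dict.empty _ (Ne.symm hw)]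

-- a modify at a fresh key is an insert of the default's image
theorem pvModify_fresh {κ ν : Type} [BEq κ] [LawfulBEq κ] (d : PySem.Dict κ ν) (k : κ)
    (dflt : ν) (f : ν → ν) (h : d.contains k = false) :
    d.modify k dflt f = d.insert k (f dflt) := by
  have h2 : d.getD k dflt = dflt := PySem.Dict.getD_of_not_contains d dflt h
  simp [PySem.Dict.modify, h2]

-- re-inserting a nodup-keyed dict's items into an empty dict gives the dict back
theorem pvReinsert (c : PySem.Dict Int Int) (h : c.keys.Nodup) :
    c.items.foldl (fun h2 cn => h2.insert cn.1 cn.2) PySem.Dict.empty = c := by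
  apply PySem.Dict.ext
  have := PySem.Dict.items_foldl_insert_fresh (l := c.items) (d := PySem.Dict.empty)
      (k := fun p => p.1) (v := fun p => p.2)
      (by intro a _; exact PySem.Dict.contains_empty _) (by simpa [PySem.Dict.keys] using h)
  simpa using this

-- B's outer loop over fresh distinct words appends the finished histograms
theorem pvB_outer (G : String → PySem.Dict Int Int) (hG : ∀ w, (G w).keys.Nodup)
    (words : List String) (res : PySem.Dict String (PySem.Dict Int Int))
    (hnd : words.Nodup) (hfresh : ∀ w ∈ words, res.contains w = false) :
    (words.foldl (fun res w =>
        res.modify w PySem.Dict.empty (fun histo =>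
          (G w).items.foldl (fun h cn => h.insert cn.1 cn.2) histo)) res).items
    = res.items ++ words.map (fun w => (w, G w)) := by
  induction words generalizing res with
  | nil => simp
  | cons w rest ih =>
      have hfw : res.contains w = false := hfresh w (by simp)
      simp only [List.foldl_cons, List.map_cons]
      rw [pvModify_fresh _ _ _ _ hfw, pvReinsert (G w) (hG w)]
      rw [ih (res.insert w (G w)) hnd.of_cons ?fresh]
      · rw [PySem.Dict.items_insert_of_not_contains _ _ hfw]
        simp
      case fresh =>
        intro w' hw'
        have hne : w' ≠ w := by
          rintro rfl; exact (List.nodup_cons.mp hnd).1 hw'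
        rw [PySem.Dict.contains_insert]
        simp [hne, hfresh w' (by simp [hw'])]

-- the shared closed form: items of A's fold over any pair list
theorem pvA_items (ps : List (String × Int)) :
    (ps.foldl pvStepA PySem.Dict.empty).items
    = (PySem.List.dedup (ps.map (fun p => p.1))).map
        (fun w => (w, PySem.Dict.counter ((ps.filter (fun p => p.1 == w)).map (fun p => p.2)))) := by
  have hnd : (ps.foldl pvStepA PySem.Dict.empty).keys.Nodup := by
    have := PySem.Dict.nodup_keys_foldl_modify_key (l := ps) (key := fun p => p.1)
        (d0 := PySem.Dict.empty)
        (f := fun (st : PySem.Dict String (PySem.Dict Int Int)) p =>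
          fun histo => histo.modify p.2 0 (· + 1))
        (d := PySem.Dict.empty) (by simp)
    simpa [pvStepA] using this
  have hkeys : (ps.foldl pvStepA PySem.Dict.empty).keys
      = PySem.List.dedup (ps.map (fun p => p.1)) := by
    have := PySem.Dict.keys_foldl_modify_key (l := ps) (key := fun p => p.1)
        (d0 := PySem.Dict.empty)
        (f := fun (st : PySem.Dict String (PySem.Dict Int Int)) p =>
          fun histo => histo.modify p.2 0 (· + 1))
        (d := PySem.Dict.empty)
    simpa [pvStepA, PySem.Dict.keys_empty, PySem.Set.update_nil_left,
      PySem.List.dedup_eq_ofList] using this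
  rw [PySem.Dict.items_eq_map_keys _ hnd PySem.Dict.empty, hkeys]
  apply List.map_congr_left
  intro w _
  rw [pvA_getD ps PySem.Dict.empty w]
  simp [PySem.Dict.getD_empty, PySem.Dict.counter_eq_foldl]

-- ===== VERDICT (by name: the statement is the Claim_ definition above) =====
theorem term_to_cat_dict_spec : Claim_equal_term_to_cat_dict := by
  intro doc _
  unfold Spec_term_to_cat_dict term_to_cat_dict term_to_cat_dict_alt
  dsimp only
  rw [pvA_flatten doc PySem.Dict.empty]
  set ps := doc.flatMap (fun dc => (pvSplit dc.1).map (fun w => (w, dc.2))) with hps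
  rw [pvA_items ps]
  rw [pvB_outer (fun w => PySem.Dict.counter ((ps.filter (fun p => p.1 == w)).map (fun p => p.2)))
        (fun w => PySem.Dict.nodup_keys_counter _)
        (PySem.List.dedup (ps.map (fun p => p.1))) PySem.Dict.empty
        (by simpa [PySem.List.dedup_eq_ofList] using PySem.Set.nodup_ofList (ps.map (fun p => p.1)))
        (by intro w _; exact PySem.Dict.contains_empty _)]
  simp [PySem.Dict.empty]
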